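-- pv_equiv track=rewrite | github.com/aleattene/advent-of-code | year_2022/day_06_tuning_trouble/solution_one.py | get_start_packet_marker
-- ===== SOURCE A (Python) =====
-- def get_start_packet_marker(data, secret_packet):
--     """
--     :param data: str
--     :param secret_packet: int
--     :return: int
--     """
--     position = 0
--     valid_sequence = []
--     for char in data:
--         position += 1
--         if char in valid_sequence:
--             index = valid_sequence.index(char)
--             valid_sequence = valid_sequence[index+1:]
--         valid_sequence.append(char)
--         if len(valid_sequence) == secret_packet:
--             return position
-- ===== SOURCE B (Python) =====
-- def get_start_packet_marker(data, secret_packet):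
--     # Brute-force window check: for each end position, test the last
--     # secret_packet characters for distinctness with a set.
--     for end in range(len(data) + 1):
--         if end >= secret_packet and len(set(data[end - secret_packet:end])) == secret_packet:
--             return end
-- ===== Notes on version B (the rewrite author's own statement) =====
-- stated objective: alternative
-- what changed: Replaces A's stateful scan that maintains a deduplicated sliding-window list (membership test, .index and slicing per character) with a stateless brute-force scan that independently tests each window of the last secret_packet characters for distinctness via a set; it trades A's incremental state for redundant per-window re-checks and is not faster.
-- intended difference: For secret_packet = 0 A returns None (its window always holds at least the char just appended) while B returns 0: the empty window at position 0 vacuously has 0 distinct characters, an equally valid choice on this unspecified corner. — e.g. on get_start_packet_marker("ab", 0): A returns none, B returns some 0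
import Mathlib
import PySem

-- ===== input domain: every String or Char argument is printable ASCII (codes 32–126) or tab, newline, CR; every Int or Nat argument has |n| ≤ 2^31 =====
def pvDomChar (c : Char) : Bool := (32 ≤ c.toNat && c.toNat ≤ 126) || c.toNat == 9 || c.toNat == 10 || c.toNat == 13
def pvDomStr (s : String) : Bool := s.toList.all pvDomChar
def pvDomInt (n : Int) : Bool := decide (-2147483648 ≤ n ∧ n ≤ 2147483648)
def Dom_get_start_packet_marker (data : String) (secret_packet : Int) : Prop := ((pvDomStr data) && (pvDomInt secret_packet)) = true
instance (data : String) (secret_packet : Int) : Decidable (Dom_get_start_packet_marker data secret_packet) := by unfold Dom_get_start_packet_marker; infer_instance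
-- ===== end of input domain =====

-- B replaces A's incremental deduplicated-window scan with a stateless brute-force check of
-- each window for distinctness via a set (objective: alternative; B trades A's incremental
-- state for redundant per-window re-checks, so it is not faster).

-- ===== PORT A =====
-- loop over the characters; state: position counter and the valid_sequence list
def pvALoop (k : Int) : List Char → Int → List Char → Option Int
  | [], _, _ => none
  | c :: rest, position, vs =>
    let position := position + 1
    -- 'if char in valid_sequence: index = valid_sequence.index(char); valid_sequence = valid_sequence[index+1:]'
    -- (slice [index+1:] with a nonnegative in-range index is List.drop (index+1) — exact here)
    let vs := if vs.contains c then
        match PySem.List.index? vs c with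
        | some idx => vs.drop (idx + 1)
        | none => vs
      else vs
    let vs := vs ++ [c]
    if (vs.length : Int) = k then some position else pvALoop k rest position vs

def get_start_packet_marker (data : String) (secret_packet : Int) : Option Int :=
  pvALoop secret_packet data.toList 0 []

-- ===== PORT B =====
-- 'for end in range(len(data)+1): if end >= k and len(set(data[end-k:end])) == k: return end'
-- (string slicing = slicing the code-point list; set of a string = set of its chars — exact)
def pvBScan (s : List Char) (k : Int) : List Int → Option Int
  | [] => none
  | e :: rest =>
    if e ≥ k ∧ ((PySem.Set.ofList (PySem.List.slice s (some (e - k)) (some e))).length : Int) = k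
    then some e else pvBScan s k rest

def get_start_packet_marker_alt (data : String) (secret_packet : Int) : Option Int :=
  pvBScan data.toList secret_packet (PySem.List.pyRange 0 ((data.toList.length : Int) + 1) 1)

-- ===== PRECONDITION & SPEC =====
-- For secret_packet = 0 A returns None (its window is never empty), while B returns 0: the empty
-- window at position 0 vacuously has 0 distinct characters — an equally valid choice on this
-- unspecified corner (a 0-length marker).
def D_get_start_packet_marker (data : String) (secret_packet : Int) : Prop := secret_packet = 0
instance (data : String) (secret_packet : Int) : Decidable (D_get_start_packet_marker data secret_packet) := by unfold D_get_start_packet_marker; infer_instance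
def Spec_get_start_packet_marker (data : String) (secret_packet : Int) (out : Option Int) : Prop := ¬ D_get_start_packet_marker data secret_packet → out = get_start_packet_marker_alt data secret_packet
instance (data : String) (secret_packet : Int) (out : Option Int) : Decidable (Spec_get_start_packet_marker data secret_packet out) := by unfold Spec_get_start_packet_marker; infer_instance
def pvDiffWitness_get_start_packet_marker : String × Int := ("ab", 0)
def pvDiffWitnessOut_get_start_packet_marker : (Option Int) × (Option Int) := (none, some 0)

-- ===== CLAIM (what is proved, stated in full; the proofs are below) =====
def Claim_unchanged_get_start_packet_marker : Prop := ∀ (data : String) (secret_packet : Int), Dom_get_start_packet_marker data secret_packet → Spec_get_start_packet_marker data secret_packet (get_start_packet_marker data secret_packet)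
def Claim_changed_get_start_packet_marker : Prop := Dom_get_start_packet_marker (pvDiffWitness_get_start_packet_marker.1) (pvDiffWitness_get_start_packet_marker.2) ∧ D_get_start_packet_marker (pvDiffWitness_get_start_packet_marker.1) (pvDiffWitness_get_start_packet_marker.2) ∧ get_start_packet_marker (pvDiffWitness_get_start_packet_marker.1) (pvDiffWitness_get_start_packet_marker.2) = pvDiffWitnessOut_get_start_packet_marker.1 ∧ get_start_packet_marker_alt (pvDiffWitness_get_start_packet_marker.1) (pvDiffWitness_get_start_packet_marker.2) = pvDiffWitnessOut_get_start_packet_marker.2 ∧ pvDiffWitnessOut_get_start_packet_marker.1 ≠ pvDiffWitnessOut_get_start_packet_marker.2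
def Claim_exact_get_start_packet_marker : Prop := ∀ (data : String) (secret_packet : Int), Dom_get_start_packet_marker data secret_packet → D_get_start_packet_marker data secret_packet → get_start_packet_marker data secret_packet ≠ get_start_packet_marker_alt data secret_packet

-- ===== LEMMAS AND PROOFS =====

-- A never returns for k ≤ 0: its window always holds at least the freshly appended char.
theorem pvALoop_none_of_nonpos (k : Int) (hk : k ≤ 0) :
    ∀ (rest : List Char) (i : Int) (vs : List Char), pvALoop k rest i vs = none := by
  intro rest
  induction rest with
  | nil => intro i vs; simp [pvALoop]
  | cons c rest ih =>
    intro i vs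
    simp only [pvALoop]
    rw [if_neg (by simp; omega), ih]

-- B never returns for k < 0: a set's size is never negative.
theorem pvBScan_none_of_neg (s : List Char) (k : Int) (hk : k < 0) :
    ∀ l, pvBScan s k l = none := by
  intro l
  induction l with
  | nil => simp [pvBScan]
  | cons e rest ih =>
    simp only [pvBScan]
    rw [if_neg (by rintro ⟨-, h⟩; omega), ih]

-- |set(l)| = |l| iff l has no duplicates.
theorem ofList_length_eq_iff_nodup (l : List Char) :
    (PySem.Set.ofList l).length = l.length ↔ l.Nodup := by
  have h1 : (PySem.Set.ofList l).length = (PySem.Set.ofList l).toFinset.card :=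
    (List.toFinset_card_of_nodup (PySem.Set.nodup_ofList l)).symm
  have h2 : (PySem.Set.ofList l).toFinset = l.dedup.toFinset := by
    ext x; simp [PySem.Set.mem_ofList, List.mem_dedup]
  have h3 : (PySem.Set.ofList l).length = l.dedup.length := by
    rw [h1, h2, List.toFinset_card_of_nodup (List.nodup_dedup l)]
  rw [h3]
  constructor
  · intro h
    rw [← List.dedup_eq_self (l := l)]
    exact (List.dedup_sublist l).eq_of_length h
  · intro h; rw [List.dedup_eq_self.mpr h]

-- B's test at end position en (1 ≤ kn, en ≤ |s|) says: the last kn chars before en are distinct.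
theorem cond_iff (s : List Char) (kn en : Nat) (hk : 1 ≤ kn) (hen : en ≤ s.length) :
    (((en : Int) ≥ (kn : Int)) ∧
      ((PySem.Set.ofList (PySem.List.slice s (some ((en : Int) - (kn : Int))) (some (en : Int)))).length : Int) = (kn : Int))
    ↔ (kn ≤ en ∧ ((s.take en).drop (en - kn)).Nodup) := by
  by_cases hke : kn ≤ en
  · have hcast : (en : Int) - (kn : Int) = ((en - kn : Nat) : Int) := by omega
    rw [hcast, PySem.List.slice_natCast]
    have harg : en - (en - kn) = kn := by omega
    rw [harg]
    have hw : (s.take en).drop (en - kn) = (s.drop (en - kn)).take kn := by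
      rw [List.drop_take, harg]
    have hlen : ((s.drop (en - kn)).take kn).length = kn := by
      simp; omega
    rw [hw]
    constructor
    · rintro ⟨-, h⟩
      refine ⟨hke, ?_⟩
      rw [← ofList_length_eq_iff_nodup, hlen]
      exact_mod_cast h
    · rintro ⟨-, h⟩
      refine ⟨by exact_mod_cast hke, ?_⟩
      exact_mod_cast ((ofList_length_eq_iff_nodup _).mpr h).trans hlen
  · constructor
    · rintro ⟨h, -⟩; exact absurd (by exact_mod_cast h) hke
    · rintro ⟨h, -⟩; exact absurd h hke

-- a suffix is determined by its length
theorem suffix_eq_drop {t u : List Char} (h : t <:+ u) : t = u.drop (u.length - t.length) := by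
  obtain ⟨p, rfl⟩ := h; simp

-- nested suffixes are ordered by length
theorem suffix_of_suffix_le {t v u : List Char} (ht : t <:+ u) (hv : v <:+ u)
    (hle : t.length ≤ v.length) : t <:+ v := by
  have hvu : v.length ≤ u.length := hv.length_le
  have h2 : v = u.drop (u.length - v.length) := suffix_eq_drop hv
  have : v.drop (v.length - t.length) = t := by
    nth_rewrite 2 [h2]
    rw [List.drop_drop, show u.length - v.length + (v.length - t.length) = u.length - t.length by omega,
      ← suffix_eq_drop ht]
  exact this ▸ List.drop_suffix _ _

theorem suffix_concat {t u : List Char} {c : Char} (h : t <:+ u ++ [c]) (hne : t ≠ []) :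
    ∃ t', t = t' ++ [c] ∧ t' <:+ u := by
  obtain ⟨p, hp⟩ := h
  rcases (List.eq_nil_or_concat t) with rfl | ⟨t', b, rfl⟩
  · exact absurd rfl hne
  · simp only [List.concat_eq_append] at hp ⊢
    rw [← List.append_assoc] at hp
    obtain ⟨h1, h2⟩ := List.append_inj' hp (by simp)
    simp at h2
    exact ⟨t', by rw [h2], ⟨p, h1⟩⟩

theorem suffix_append_right {l₁ l₂ t : List Char} (h : l₁ <:+ l₂) : l₁ ++ t <:+ l₂ ++ t := by
  obtain ⟨p, rfl⟩ := h; exact ⟨p, by simp⟩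

-- One step of A's window update preserves "longest duplicate-free suffix".
theorem step_window (vs : List Char) (c : Char) (done : List Char)
    (hnd : vs.Nodup) (hsuf : vs <:+ done)
    (hmax : ∀ t : List Char, t <:+ done → t.Nodup → t.length ≤ vs.length) :
    ((if vs.contains c then (match PySem.List.index? vs c with
        | some idx => vs.drop (idx+1) | none => vs) else vs) ++ [c]).Nodup ∧
    ((if vs.contains c then (match PySem.List.index? vs c with
        | some idx => vs.drop (idx+1) | none => vs) else vs) ++ [c]) <:+ (done ++ [c]) ∧
    (∀ t : List Char, t <:+ (done ++ [c]) → t.Nodup →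
      t.length ≤ ((if vs.contains c then (match PySem.List.index? vs c with
        | some idx => vs.drop (idx+1) | none => vs) else vs) ++ [c]).length) ∧
    ((if vs.contains c then (match PySem.List.index? vs c with
        | some idx => vs.drop (idx+1) | none => vs) else vs) ++ [c]).length ≤ vs.length + 1 := by
  by_cases hc : c ∈ vs
  · obtain ⟨j, hj⟩ : ∃ j, PySem.List.index? vs c = some j :=
      Option.isSome_iff_exists.mp ((PySem.List.index?_isSome_iff (xs := vs) (v := c)).mpr hc)
    obtain ⟨hjlt, hjc, -⟩ := PySem.List.getElem_of_index?_eq_some hj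
    have hc' : vs.contains c = true := by simpa using hc
    simp only [hc', if_true, hj]
    have hcnotin : c ∉ vs.drop (j + 1) := by
      intro hmem
      obtain ⟨m, hm, hme⟩ := List.getElem_of_mem hmem
      rw [List.getElem_drop] at hme
      have : j = j + 1 + m := (List.Nodup.getElem_inj_iff hnd).mp (hjc.trans hme.symm)
      omega
    refine ⟨?_, ?_, ?_, by simp⟩
    · exact List.Nodup.append ((List.drop_sublist _ _).nodup hnd)
        (List.nodup_singleton c) (by simpa using hcnotin)
    · exact suffix_append_right ((List.drop_suffix (j+1) vs).trans hsuf)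
    · intro t ht htnd
      rcases eq_or_ne t [] with rfl | hne
      · simp
      obtain ⟨t', rfl, ht'⟩ := suffix_concat ht hne
      have ht'nd : t'.Nodup := (List.sublist_append_left t' [c]).nodup htnd
      have hcnott' : c ∉ t' := by
        intro hmem
        have h := htnd
        simp only [List.nodup_append, List.nodup_singleton] at h
        exact h.2.2 c hmem c (List.mem_singleton_self c) rfl
      have hlen1 : t'.length ≤ vs.length := hmax t' ht' ht'nd
      have ht'vs : t' <:+ vs := suffix_of_suffix_le ht' hsuf hlen1
      have hlen2 : t'.length ≤ vs.length - (j + 1) := by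
        by_contra hgt
        apply hcnott'
        have hdrop := suffix_eq_drop ht'vs
        have hmle : vs.length - t'.length ≤ j := by omega
        have hmem : vs[j] ∈ vs.drop (vs.length - t'.length) := by
          have hidx : j - (vs.length - t'.length) < (vs.drop (vs.length - t'.length)).length := by
            simp; omega
          have : (vs.drop (vs.length - t'.length))[j - (vs.length - t'.length)] = vs[j] := by
            rw [List.getElem_drop]; congr 1; omega
          exact this ▸ List.getElem_mem hidx
        rw [← hdrop] at hmem
        exact hjc ▸ hmem
      simp only [List.length_append, List.length_singleton, List.length_drop]
      omega
  · have hc' : vs.contains c = false := by simpa using hc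
    simp only [hc', Bool.false_eq_true, if_false]
    refine ⟨?_, suffix_append_right hsuf, ?_, by simp⟩
    · exact List.Nodup.append hnd (List.nodup_singleton c) (by simpa using hc)
    · intro t ht htnd
      rcases eq_or_ne t [] with rfl | hne
      · simp
      obtain ⟨t', rfl, ht'⟩ := suffix_concat ht hne
      have ht'nd : t'.Nodup := (List.sublist_append_left t' [c]).nodup htnd
      have := hmax t' ht' ht'nd
      simp only [List.length_append, List.length_singleton]
      omega

-- Main loop correspondence: if vs is the longest duplicate-free suffix of the processed
-- prefix `done` and still shorter than kn, A's remaining loop agrees with B's remaining scan.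
theorem pv_main (kn : Nat) (hk : 1 ≤ kn) (s : List Char) :
    ∀ (rest done vs : List Char), s = done ++ rest →
      vs.Nodup → vs <:+ done →
      (∀ t : List Char, t <:+ done → t.Nodup → t.length ≤ vs.length) →
      vs.length < kn →
      pvALoop (kn : Int) rest (done.length : Int) vs
        = pvBScan s (kn : Int) (PySem.List.pyRange ((done.length : Int) + 1) ((s.length : Int) + 1) 1) := by
  intro rest
  induction rest with
  | nil =>
    intro done vs hs _ _ _ _
    subst hs
    rw [PySem.List.pyRange_one]
    simp [pvALoop, pvBScan]
  | cons c rest ih =>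
    intro done vs hs hnd hsuf hmax hlt
    have hslen : s.length = done.length + 1 + rest.length := by
      rw [hs]; simp; omega
    have hs' : s = (done ++ [c]) ++ rest := by rw [hs]; simp
    obtain ⟨hnd', hsuf', hmax', hlenle⟩ := step_window vs c done hnd hsuf hmax
    set w := (if vs.contains c then (match PySem.List.index? vs c with
        | some idx => vs.drop (idx+1) | none => vs) else vs) ++ [c] with hwdef
    have hdone' : (done ++ [c]).length = done.length + 1 := by simp
    have htake : s.take (done.length + 1) = done ++ [c] := by
      rw [hs', ← hdone']
      exact List.take_left
    -- the two loop tests agree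
    have hconds : ((w.length : Int) = (kn : Int)) ↔
        (kn ≤ done.length + 1 ∧ ((s.take (done.length + 1)).drop (done.length + 1 - kn)).Nodup) := by
      rw [htake]
      constructor
      · intro h
        have hwlen : w.length = kn := by exact_mod_cast h
        have hke : kn ≤ done.length + 1 := by
          have := hsuf'.length_le
          rw [hwlen] at this; simpa using this
        refine ⟨hke, ?_⟩
        have : w = (done ++ [c]).drop (done.length + 1 - kn) := by
          have := suffix_eq_drop hsuf'
          rw [hwlen, hdone'] at this
          exact this
        rw [← this]; exact hnd'
      · rintro ⟨hke, hwin⟩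
        have hwinsuf : (done ++ [c]).drop (done.length + 1 - kn) <:+ (done ++ [c]) :=
          List.drop_suffix _ _
        have hwinlen : ((done ++ [c]).drop (done.length + 1 - kn)).length = kn := by
          simp; omega
        have := hmax' _ hwinsuf hwin
        rw [hwinlen] at this
        have : w.length = kn := by omega
        exact_mod_cast this
    -- unfold one step of B
    have hcast : ((done.length : Int) + 1) = (((done.length + 1 : Nat)) : Int) := by push_cast; ring
    rw [PySem.List.pyRange_one_cons (by omega), pvBScan, hcast]
    rw [if_congr (cond_iff s kn (done.length + 1) hk (by omega)) rfl rfl]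
    -- unfold one step of A
    show (if (w.length : Int) = (kn : Int) then some ((done.length : Int) + 1)
          else pvALoop (kn : Int) rest ((done.length : Int) + 1) w) = _
    by_cases hcond : kn ≤ done.length + 1 ∧ ((s.take (done.length + 1)).drop (done.length + 1 - kn)).Nodup
    · rw [if_pos (hconds.mpr hcond), if_pos hcond, hcast]
    · rw [if_neg (fun h => hcond (hconds.mp h)), if_neg hcond]
      have hrec := ih (done ++ [c]) w hs' hnd' hsuf' hmax'
        (by
          have hne : w.length ≠ kn := fun h => hcond (hconds.mp (by exact_mod_cast h))
          omega)
      rw [hdone'] at hrec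
      rw [← hcast]
      convert hrec using 3

-- ===== VERDICT (by name: the statements are the Claim_ definitions above) =====
theorem get_start_packet_marker_spec : Claim_unchanged_get_start_packet_marker := by
  intro data k _
  unfold Spec_get_start_packet_marker D_get_start_packet_marker
  intro hD
  unfold get_start_packet_marker get_start_packet_marker_alt
  rcases lt_trichotomy k 0 with hlt | rfl | hpos
  · rw [pvALoop_none_of_nonpos k (le_of_lt hlt), pvBScan_none_of_neg _ k hlt]
  · exact absurd rfl hD
  · obtain ⟨kn, rfl⟩ : ∃ kn : Nat, k = (kn : Int) := ⟨k.toNat, by omega⟩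
    have hk : 1 ≤ kn := by exact_mod_cast hpos
    rw [PySem.List.pyRange_one_cons (by omega), pvBScan]
    rw [if_neg (by rintro ⟨h, -⟩; omega)]
    have := pv_main kn hk data.toList data.toList [] [] (by simp) (by simp) (by simp)
      (by intro t ht _; simpa using ht.length_le) (by simp; omega)
    simpa using this

theorem get_start_packet_marker_changed : Claim_changed_get_start_packet_marker := by
  unfold Claim_changed_get_start_packet_marker; decide

theorem get_start_packet_marker_tight : Claim_exact_get_start_packet_marker := by
  intro data k _ hd
  unfold D_get_start_packet_marker at hd
  subst hd
  unfold get_start_packet_marker get_start_packet_marker_alt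
  rw [pvALoop_none_of_nonpos 0 le_rfl]
  rw [PySem.List.pyRange_one_cons (by omega), pvBScan]
  rw [if_pos ⟨le_refl (0 : Int), by norm_num [PySem.List.slice_to]⟩]
  simp
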